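-- pv_equiv track=rewrite | github.com/jmcconne10/aocDay1 | Day9/solution.py | build_extrema
-- ===== SOURCE A (Python) =====
-- def build_extrema(coords):
--     min_y_for_x = {}
--     max_y_for_x = {}
--     min_x_for_y = {}
--     max_x_for_y = {}
--
--     for x, y in coords:
--         # For each x → track y bounds
--         if x not in min_y_for_x or y < min_y_for_x[x]:
--             min_y_for_x[x] = y
--         if x not in max_y_for_x or y > max_y_for_x[x]:
--             max_y_for_x[x] = y
--
--         # For each y → track x bounds
--         if y not in min_x_for_y or x < min_x_for_y[y]:
--             min_x_for_y[y] = x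
--         if y not in max_x_for_y or x > max_x_for_y[y]:
--             max_x_for_y[y] = x
--
--     return min_y_for_x, max_y_for_x, min_x_for_y, max_x_for_y
-- ===== SOURCE B (Python) =====
-- def build_extrema(coords):
--     # Group-first decomposition: one pass builds per-key value lists,
--     # then the four extrema dicts are derived by comprehension.
--     ys_for_x = {}
--     xs_for_y = {}
--     for x, y in coords:
--         ys_for_x.setdefault(x, []).append(y)
--         xs_for_y.setdefault(y, []).append(x)
--     min_y_for_x = {x: min(ys) for x, ys in ys_for_x.items()}
--     max_y_for_x = {x: max(ys) for x, ys in ys_for_x.items()}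
--     min_x_for_y = {y: min(xs) for y, xs in xs_for_y.items()}
--     max_x_for_y = {y: max(xs) for y, xs in xs_for_y.items()}
--     return min_y_for_x, max_y_for_x, min_x_for_y, max_x_for_y
-- ===== Notes on version B (the rewrite author's own statement) =====
-- stated objective: alternative
-- what changed: B groups all y-values per x and x-values per y in one pass, then derives the four extrema dicts by aggregation comprehensions, instead of A's four incremental running-extremum dict updates inside the loop.
import Mathlib
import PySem

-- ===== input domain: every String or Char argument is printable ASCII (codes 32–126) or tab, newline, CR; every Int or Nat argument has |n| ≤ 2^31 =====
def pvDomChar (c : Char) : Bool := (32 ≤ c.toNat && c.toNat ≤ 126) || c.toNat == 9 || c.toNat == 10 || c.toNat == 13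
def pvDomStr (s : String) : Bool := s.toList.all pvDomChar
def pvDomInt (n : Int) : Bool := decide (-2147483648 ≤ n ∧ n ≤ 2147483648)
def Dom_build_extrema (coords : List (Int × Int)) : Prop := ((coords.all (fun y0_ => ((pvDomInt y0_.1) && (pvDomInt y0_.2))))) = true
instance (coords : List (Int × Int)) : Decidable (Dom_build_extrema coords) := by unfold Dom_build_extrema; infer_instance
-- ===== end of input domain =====

-- B's change: group values per key in one pass, then aggregate; A keeps running extrema — alternative decomposition, same cost.

-- ===== PORT A =====
def build_extrema (coords : List (Int × Int)) : (List (Int × Int)) × (List (Int × Int)) × (List (Int × Int)) × (List (Int × Int)) :=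
  let st := coords.foldl
    (fun (st : PySem.Dict Int Int × PySem.Dict Int Int × PySem.Dict Int Int × PySem.Dict Int Int) p =>
      let x := p.1
      let y := p.2
      -- 'x not in d or y < d[x]' (getD 0 is a totalization guard; Python short-circuits)
      let d1 := if !st.1.contains x || decide (y < st.1.getD x 0) then st.1.insert x y else st.1
      let d2 := if !st.2.1.contains x || decide (y > st.2.1.getD x 0) then st.2.1.insert x y else st.2.1
      let d3 := if !st.2.2.1.contains y || decide (x < st.2.2.1.getD y 0) then st.2.2.1.insert y x else st.2.2.1
      let d4 := if !st.2.2.2.contains y || decide (x > st.2.2.2.getD y 0) then st.2.2.2.insert y x else st.2.2.2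
      (d1, d2, d3, d4))
    (PySem.Dict.empty, PySem.Dict.empty, PySem.Dict.empty, PySem.Dict.empty)
  (st.1.items, st.2.1.items, st.2.2.1.items, st.2.2.2.items)

-- ===== PORT B =====
def build_extrema_alt (coords : List (Int × Int)) : (List (Int × Int)) × (List (Int × Int)) × (List (Int × Int)) × (List (Int × Int)) :=
  let gs := coords.foldl
    (fun (gs : PySem.Dict Int (List Int) × PySem.Dict Int (List Int)) p =>
      (gs.1.modify p.1 [] (· ++ [p.2]), gs.2.modify p.2 [] (· ++ [p.1])))
    (PySem.Dict.empty, PySem.Dict.empty)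
  -- 'min(ys)'/'max(ys)' on the (always nonempty) group lists; getD 0 is a totalization guard
  (gs.1.items.map (fun q => (q.1, (PySem.List.min? q.2 (fun v => v)).getD 0)),
   gs.1.items.map (fun q => (q.1, (PySem.List.max? q.2 (fun v => v)).getD 0)),
   gs.2.items.map (fun q => (q.1, (PySem.List.min? q.2 (fun v => v)).getD 0)),
   gs.2.items.map (fun q => (q.1, (PySem.List.max? q.2 (fun v => v)).getD 0)))

-- ===== PRECONDITION & SPEC =====
def Spec_build_extrema (coords : List (Int × Int)) (out : (List (Int × Int)) × (List (Int × Int)) × (List (Int × Int)) × (List (Int × Int))) : Prop := out = build_extrema_alt coords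
instance (coords : List (Int × Int)) (out : (List (Int × Int)) × (List (Int × Int)) × (List (Int × Int)) × (List (Int × Int))) : Decidable (Spec_build_extrema coords out) := by unfold Spec_build_extrema; infer_instance

-- ===== CLAIM (what is proved, stated in full; the proofs are below) =====
def Claim_equal_build_extrema : Prop := ∀ (coords : List (Int × Int)), Dom_build_extrema coords → Spec_build_extrema coords (build_extrema coords)

-- ===== LEMMAS AND PROOFS =====

-- A's four dict updates are independent: the 4-tuple fold splits componentwise.
theorem pv_fold_split (l : List (Int × Int))
    (s1 s2 s3 s4 : PySem.Dict Int Int → Int × Int → PySem.Dict Int Int)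
    (a b c d : PySem.Dict Int Int) :
    l.foldl (fun st p => (s1 st.1 p, s2 st.2.1 p, s3 st.2.2.1 p, s4 st.2.2.2 p)) (a, b, c, d)
      = (l.foldl s1 a, l.foldl s2 b, l.foldl s3 c, l.foldl s4 d) := by
  induction l generalizing a b c d with
  | nil => rfl
  | cons p t ih => simpa using ih _ _ _ _

-- B's grouping fold also splits componentwise (with swapped key/value for the second group).
theorem pv_group_split (l : List (Int × Int)) (a b : PySem.Dict Int (List Int)) :
    l.foldl (fun gs p => (gs.1.modify p.1 [] (· ++ [p.2]), gs.2.modify p.2 [] (· ++ [p.1]))) (a, b)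
      = (l.foldl (fun g p => g.modify p.1 [] (· ++ [p.2])) a,
         (l.map (fun p => (p.2, p.1))).foldl (fun g p => g.modify p.1 [] (· ++ [p.2])) b) := by
  induction l generalizing a b with
  | nil => rfl
  | cons p t ih => simpa using ih _ _

-- The core invariant: the running-extremum dict is the group dict aggregated itemwise.
theorem pv_rel (cmp : Int → Int → Bool) (agg : List Int → Int)
    (h1 : ∀ y, agg [y] = y)
    (h2 : ∀ ys y, ys ≠ [] → agg (ys ++ [y]) = if cmp y (agg ys) then y else agg ys)
    (l : List (Int × Int)) (d : PySem.Dict Int Int) (g : PySem.Dict Int (List Int))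
    (hnd : g.keys.Nodup)
    (hit : d.items = g.items.map (fun q => (q.1, agg q.2)))
    (hne : ∀ q ∈ g.items, q.2 ≠ []) :
    (l.foldl (fun d p => if !d.contains p.1 || cmp p.2 (d.getD p.1 0) then d.insert p.1 p.2 else d) d).items
      = ((l.foldl (fun g p => g.modify p.1 [] (· ++ [p.2])) g).items).map (fun q => (q.1, agg q.2)) := by
  induction l generalizing d g with
  | nil => exact hit
  | cons p t ih =>
    obtain ⟨x, y⟩ := p
    have hkeys : d.keys = g.keys := by
      simp only [PySem.Dict.keys, hit, List.map_map]; rfl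
    have hdnd : d.keys.Nodup := hkeys ▸ hnd
    have hmod : g.modify x [] (· ++ [y]) = g.insert x (g.getD x [] ++ [y]) := by
      simp [PySem.Dict.modify]
    by_cases hc : g.contains x = true
    · -- key already present
      obtain ⟨ys, hys⟩ : ∃ ys, g.get? x = some ys := by
        rcases h : g.get? x with _ | ys
        · rw [PySem.Dict.contains_eq_isSome_get?, h] at hc; simp at hc
        · exact ⟨ys, rfl⟩
      have hmem : (x, ys) ∈ g.items := PySem.Dict.mem_items_of_get?_eq_some g hys
      have hysne : ys ≠ [] := hne _ hmem
      have hdget : d.get? x = some (agg ys) := by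
        refine PySem.Dict.get?_of_mem_items d ?_ hdnd
        rw [hit]
        exact List.mem_map_of_mem hmem
      have hdc : d.contains x = true := by
        rw [PySem.Dict.contains_eq_isSome_get?, hdget]; rfl
      have hdgd : d.getD x 0 = agg ys := PySem.Dict.getD_of_get?_eq_some d 0 hdget
      have hgd : g.getD x [] = ys := PySem.Dict.getD_of_get?_eq_some g [] hys
      have hg' : g.modify x [] (· ++ [y]) = g.insert x (ys ++ [y]) := by rw [hmod, hgd]
      have hgit : (g.insert x (ys ++ [y])).items
          = g.items.map (fun q => if q.1 == x then (x, ys ++ [y]) else q) :=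
        PySem.Dict.items_insert_of_contains g _ hc
      simp only [List.foldl_cons, hg', hdc, hdgd, Bool.not_true, Bool.false_or]
      apply ih
      · simpa [hgit, PySem.Dict.keys, List.map_map] using
          (show (g.insert x (ys ++ [y])).keys.Nodup from PySem.Dict.nodup_keys_insert _ _ _ hnd)
      · -- items relation after the step
        by_cases hcmp : cmp y (agg ys) = true
        · rw [hcmp, if_pos rfl]
          rw [PySem.Dict.items_insert_of_contains d _ hdc, hit, hgit,
              List.map_map, List.map_map]
          apply List.map_congr_left
          intro q hq
          by_cases hqx : q.1 = x
          · have hqys : q.2 = ys := by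
              have : g.get? q.1 = some q.2 :=
                (PySem.Dict.get?_eq_some_iff_mem_items g q.1 q.2 hnd).2 (by simpa using hq)
              rw [hqx, hys] at this; exact (Option.some_injective _ this).symm
            simp [Function.comp, hqx, h2 ys y hysne, hcmp]
          · simp [Function.comp, hqx]
        · have hcmp' : cmp y (agg ys) = false := by simpa using hcmp
          rw [hcmp', if_neg (by simp)]
          rw [hit, hgit, List.map_map]
          apply List.map_congr_left
          intro q hq
          by_cases hqx : q.1 = x
          · have hqys : q.2 = ys := by
              have : g.get? q.1 = some q.2 :=
                (PySem.Dict.get?_eq_some_iff_mem_items g q.1 q.2 hnd).2 hq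
              rw [hqx, hys] at this; exact (Option.some_injective _ this).symm
            simp [Function.comp, hqx, hqys, h2 ys y hysne, hcmp']
          · simp [Function.comp, hqx]
      · intro q hq
        rw [hgit] at hq
        obtain ⟨r, hr, hrq⟩ := List.mem_map.1 hq
        by_cases hrx : r.1 = x
        · simp [hrx] at hrq; subst hrq; simp
        · simp [hrx] at hrq; subst hrq; exact hne _ hr
    · -- fresh key
      have hcf : g.contains x = false := by simpa using hc
      have hdc : d.contains x = false := by
        have hg : x ∉ g.keys := by
          simpa [PySem.Dict.contains_eq_decide_mem_keys] using hcf
        have hd : x ∉ d.keys := hkeys ▸ hg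
        simpa [PySem.Dict.contains_eq_decide_mem_keys] using hd
      have hgd : g.getD x [] = [] := PySem.Dict.getD_of_not_contains g [] hcf
      have hg' : g.modify x [] (· ++ [y]) = g.insert x [y] := by rw [hmod, hgd]; rfl
      simp only [List.foldl_cons, hg', hdc, Bool.not_false, Bool.true_or, if_pos]
      apply ih
      · exact PySem.Dict.nodup_keys_insert _ _ _ hnd
      · rw [PySem.Dict.items_insert_of_not_contains d _ hdc,
            PySem.Dict.items_insert_of_not_contains g _ hcf, List.map_append, hit]
        simp [h1]
      · intro q hq
        rw [PySem.Dict.items_insert_of_not_contains g _ hcf] at hq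
        rcases List.mem_append.1 hq with h | h
        · exact hne _ h
        · simp at h; subst h; simp

-- agg/cmp facts for Python's min and max
theorem pv_min_single (y : Int) : ((PySem.List.min? [y] (fun v => v)).getD 0) = y := by
  simp [PySem.List.min?_id_cons]

theorem pv_min_append (ys : List Int) (y : Int) (h : ys ≠ []) :
    ((PySem.List.min? (ys ++ [y]) (fun v => v)).getD 0)
      = if decide (y < (PySem.List.min? ys (fun v => v)).getD 0) then y
        else (PySem.List.min? ys (fun v => v)).getD 0 := by
  obtain ⟨a, t, rfl⟩ := List.exists_cons_of_ne_nil h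
  rw [show (a :: t) ++ [y] = a :: (t ++ [y]) from rfl,
      PySem.List.min?_id_cons, PySem.List.min?_id_cons]
  simp only [List.foldl_append, List.foldl_cons, List.foldl_nil, Option.getD_some]
  rcases le_or_gt (t.foldl min a) y with hle | hlt
  · rw [min_eq_left hle, if_neg (by simpa using hle)]
  · rw [min_eq_right hlt.le, if_pos (by simpa using hlt)]

theorem pv_max_single (y : Int) : ((PySem.List.max? [y] (fun v => v)).getD 0) = y := by
  simp [PySem.List.max?_id_cons]

theorem pv_max_append (ys : List Int) (y : Int) (h : ys ≠ []) :
    ((PySem.List.max? (ys ++ [y]) (fun v => v)).getD 0)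
      = if decide (y > (PySem.List.max? ys (fun v => v)).getD 0) then y
        else (PySem.List.max? ys (fun v => v)).getD 0 := by
  obtain ⟨a, t, rfl⟩ := List.exists_cons_of_ne_nil h
  rw [show (a :: t) ++ [y] = a :: (t ++ [y]) from rfl,
      PySem.List.max?_id_cons, PySem.List.max?_id_cons]
  simp only [List.foldl_append, List.foldl_cons, List.foldl_nil, Option.getD_some]
  rcases le_or_gt y (t.foldl max a) with hle | hlt
  · rw [max_eq_left hle, if_neg (by simpa using hle)]
  · rw [max_eq_right hlt.le, if_pos (by simpa using hlt)]

-- ===== VERDICT (by name: the statement is the Claim_ definition above) =====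
theorem build_extrema_spec : Claim_equal_build_extrema := by
  intro coords _
  unfold Spec_build_extrema build_extrema build_extrema_alt
  rw [pv_group_split]
  have hsplit := pv_fold_split coords
    (fun d p => if !d.contains p.1 || decide (p.2 < d.getD p.1 0) then d.insert p.1 p.2 else d)
    (fun d p => if !d.contains p.1 || decide (p.2 > d.getD p.1 0) then d.insert p.1 p.2 else d)
    (fun d p => if !d.contains p.2 || decide (p.1 < d.getD p.2 0) then d.insert p.2 p.1 else d)
    (fun d p => if !d.contains p.2 || decide (p.1 > d.getD p.2 0) then d.insert p.2 p.1 else d)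
    PySem.Dict.empty PySem.Dict.empty PySem.Dict.empty PySem.Dict.empty
  simp only at hsplit ⊢
  rw [hsplit]
  have hswap3 : coords.foldl
      (fun d p => if !d.contains p.2 || decide (p.1 < d.getD p.2 0) then d.insert p.2 p.1 else d)
      PySem.Dict.empty
      = (coords.map (fun p => (p.2, p.1))).foldl
        (fun d p => if !d.contains p.1 || decide (p.2 < d.getD p.1 0) then d.insert p.1 p.2 else d)
        PySem.Dict.empty := by rw [List.foldl_map]
  have hswap4 : coords.foldl
      (fun d p => if !d.contains p.2 || decide (p.1 > d.getD p.2 0) then d.insert p.2 p.1 else d)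
      PySem.Dict.empty
      = (coords.map (fun p => (p.2, p.1))).foldl
        (fun d p => if !d.contains p.1 || decide (p.2 > d.getD p.1 0) then d.insert p.1 p.2 else d)
        PySem.Dict.empty := by rw [List.foldl_map]
  refine Prod.ext ?_ (Prod.ext ?_ (Prod.ext ?_ ?_)) <;> simp only
  · exact pv_rel (fun y m => decide (y < m))
      (fun ys => (PySem.List.min? ys (fun v => v)).getD 0) pv_min_single pv_min_append coords
      PySem.Dict.empty PySem.Dict.empty (by simp [PySem.Dict.empty, PySem.Dict.keys])
      (by simp [PySem.Dict.empty]) (by simp [PySem.Dict.empty])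
  · exact pv_rel (fun y m => decide (y > m))
      (fun ys => (PySem.List.max? ys (fun v => v)).getD 0) pv_max_single pv_max_append coords
      PySem.Dict.empty PySem.Dict.empty (by simp [PySem.Dict.empty, PySem.Dict.keys])
      (by simp [PySem.Dict.empty]) (by simp [PySem.Dict.empty])
  · rw [hswap3]
    exact pv_rel (fun y m => decide (y < m))
      (fun ys => (PySem.List.min? ys (fun v => v)).getD 0) pv_min_single pv_min_append _
      PySem.Dict.empty PySem.Dict.empty (by simp [PySem.Dict.empty, PySem.Dict.keys])
      (by simp [PySem.Dict.empty]) (by simp [PySem.Dict.empty])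
  · rw [hswap4]
    exact pv_rel (fun y m => decide (y > m))
      (fun ys => (PySem.List.max? ys (fun v => v)).getD 0) pv_max_single pv_max_append _
      PySem.Dict.empty PySem.Dict.empty (by simp [PySem.Dict.empty, PySem.Dict.keys])
      (by simp [PySem.Dict.empty]) (by simp [PySem.Dict.empty])
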